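-- pv_equiv track=rewrite | github.com/billyean/acadia | python/permutation/combination.py | combination_with_increasing_index
-- ===== SOURCE A (Python) =====
-- def combination_with_increasing_index(categories, indices):
--     combination = []
--     for p, i in enumerate(indices):
--         combination.append(categories[p][i])
--
--     pi = len(indices) - 1
--
--     while pi >= 0 and indices[pi] == len(categories[pi]) - 1:
--         indices[pi] = 0
--         pi -= 1
--
--     if pi >= 0:
--         indices[pi] += 1
--
--     return combination
-- ===== SOURCE B (Python) =====
-- def _pick(categories, indices):
--     # Recursively pick categories[0][indices[0]] and recurse on the tails.
--     if not indices:
--         return []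
--     return [categories[0][indices[0]]] + _pick(categories[1:], indices[1:])
--
--
-- def combination_with_increasing_index(categories, indices):
--     # Read the combination from the pre-mutation indices, recursively.
--     combination = _pick(categories, indices)
--     # Odometer increment via mixed-radix arithmetic: encode, add 1 mod product, decode.
--     value = 0
--     product = 1
--     for c, i in zip(categories, indices):
--         value = value * len(c) + i
--         product *= len(c)
--     value = (value + 1) % product
--     for p in range(len(indices) - 1, -1, -1):
--         value, indices[p] = divmod(value, len(categories[p]))
--     return combination
-- ===== Notes on version B (the rewrite author's own statement) =====
-- stated objective: alternative
-- what changed: The combination is built by a recursive helper consuming the heads of both lists instead of an enumerate-and-append loop, and the in-place odometer increment is done by mixed-radix encode / (+1 mod product) / divmod decode instead of an explicit trailing-carry while loop.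
import Mathlib
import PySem

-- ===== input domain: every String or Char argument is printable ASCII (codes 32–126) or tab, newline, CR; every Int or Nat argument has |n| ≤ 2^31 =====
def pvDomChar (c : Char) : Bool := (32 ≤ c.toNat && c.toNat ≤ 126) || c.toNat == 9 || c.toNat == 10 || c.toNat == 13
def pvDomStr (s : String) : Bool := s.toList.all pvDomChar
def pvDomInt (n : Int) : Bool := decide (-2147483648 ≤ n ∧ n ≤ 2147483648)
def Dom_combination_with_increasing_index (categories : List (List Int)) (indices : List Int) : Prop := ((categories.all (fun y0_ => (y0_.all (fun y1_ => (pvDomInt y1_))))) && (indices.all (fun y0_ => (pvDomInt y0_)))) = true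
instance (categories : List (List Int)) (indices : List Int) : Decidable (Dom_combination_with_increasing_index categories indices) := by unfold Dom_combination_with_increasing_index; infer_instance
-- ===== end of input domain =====

-- A mutates `indices` in place (the odometer increment); that side effect is not part of the return
-- value, so the equivalence proved here is about the RETURN value only.
-- B builds the combination by a recursive helper consuming the heads of both lists, and performs the
-- increment by mixed-radix encode / +1 mod product / divmod decode instead of A's explicit carry loop.

-- ===== PORT A =====
-- the 'for p, i in enumerate(indices): combination.append(categories[p][i])' loop;
-- the subsequent while/if block only mutates `indices` and contributes nothing to the return value.
def combination_with_increasing_index (categories : List (List Int)) (indices : List Int) : List Int :=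
  (PySem.List.enumerate indices).foldl
    (fun combination pi =>
      combination ++ [PySem.List.pyGetD (PySem.List.pyGetD categories pi.1 []) pi.2 0]) []

-- ===== PORT B =====
-- Source B's recursive helper _pick: '[categories[0][indices[0]]] + _pick(categories[1:], indices[1:])';
-- the encode/decode increment again only mutates `indices` and contributes nothing to the return value.
def pvPick : List (List Int) → List Int → List Int
  | _, [] => []
  | cats, i :: rest =>
      PySem.List.pyGetD (PySem.List.pyGetD cats 0 []) i 0 :: pvPick (cats.drop 1) rest

def combination_with_increasing_index_alt (categories : List (List Int)) (indices : List Int) : List Int :=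
  pvPick categories indices

-- ===== PRECONDITION & SPEC =====
-- Pre_ excludes exactly the inputs where A raises IndexError: a position p of `indices` with no
-- p-th category, or indices[p] out of range (Python negative-wrap range) for categories[p].
def Pre_combination_with_increasing_index (categories : List (List Int)) (indices : List Int) : Prop :=
  indices.length ≤ categories.length ∧
  ∀ p : Nat, p < indices.length →
    PySem.Raise.InRange (categories.getD p []).length (indices.getD p 0)
instance (categories : List (List Int)) (indices : List Int) : Decidable (Pre_combination_with_increasing_index categories indices) := by unfold Pre_combination_with_increasing_index; infer_instance
def pvWitness_combination_with_increasing_index : List (List Int) × List Int := ([[10, 20], [30]], [1, 0])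
def Spec_combination_with_increasing_index (categories : List (List Int)) (indices : List Int) (out : List Int) : Prop := out = combination_with_increasing_index_alt categories indices
instance (categories : List (List Int)) (indices : List Int) (out : List Int) : Decidable (Spec_combination_with_increasing_index categories indices out) := by unfold Spec_combination_with_increasing_index; infer_instance

-- ===== CLAIM (what is proved, stated in full; the proofs are below) =====
def Claim_equal_combination_with_increasing_index : Prop := ∀ (categories : List (List Int)) (indices : List Int), Dom_combination_with_increasing_index categories indices → Pre_combination_with_increasing_index categories indices → Spec_combination_with_increasing_index categories indices (combination_with_increasing_index categories indices)

-- ===== LEMMAS AND PROOFS =====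

-- A's enumerate loop, read at offset s into `categories`, equals B's recursion on the suffix.
lemma pv_enum_eq_pick (idx : List Int) :
    ∀ (cats : List (List Int)) (s : Nat), idx.length ≤ (cats.drop s).length →
    (PySem.List.enumerate idx (s : Int)).map
        (fun pi => PySem.List.pyGetD (PySem.List.pyGetD cats pi.1 []) pi.2 0)
      = pvPick (cats.drop s) idx := by
  induction idx with
  | nil => intro cats s _; simp [PySem.List.enumerate_nil, pvPick]
  | cons i rest ih =>
    intro cats s h
    have hs : s < cats.length := by
      have := List.length_drop (l := cats) (i := s)
      simp at h
      omega
    have hdrop : cats.drop s = cats[s] :: cats.drop (s + 1) :=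
      List.drop_eq_getElem_cons hs
    have hget : PySem.List.pyGetD cats (s : Int) [] = cats[s] := by
      rw [PySem.List.pyGetD_natCast]
      exact List.getD_eq_getElem _ _ hs
    have hget0 : PySem.List.pyGetD (cats.drop s) (0 : Int) [] = cats[s] := by
      rw [hdrop]
      rw [show ((0 : Int)) = ((0 : Nat) : Int) from rfl, PySem.List.pyGetD_natCast]
      rfl
    have hdd : (cats.drop s).drop 1 = cats.drop (s + 1) := by
      rw [List.drop_drop]
    have hcast : (s : Int) + 1 = ((s + 1 : Nat) : Int) := by push_cast; ring
    rw [PySem.List.enumerate_cons]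
    simp only [List.map_cons, pvPick]
    rw [hget, hget0, hdd]
    congr 1
    rw [hcast, ih cats (s + 1)]
    rw [hdrop] at h
    simp at h ⊢
    omega

-- ===== VERDICT (by name: the statement is the Claim_ definition above) =====
theorem combination_with_increasing_index_spec : Claim_equal_combination_with_increasing_index := by
  intro categories indices _ hpre
  unfold Spec_combination_with_increasing_index
  unfold combination_with_increasing_index combination_with_increasing_index_alt
  rw [PySem.List.foldl_append_singleton_eq_map, List.nil_append]
  have := pv_enum_eq_pick indices categories 0 (by simpa using hpre.1)
  simpa using this
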